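-- pv_equiv track=rewrite | github.com/pooyanazad/Code-Analyzer | tests/bad_test_code.py | inefficient_function
-- ===== SOURCE A (Python) =====
-- def inefficient_function(data):
--     # Inefficient nested loops
--     result = []
--     for i in range(len(data)):
--         for j in range(len(data)):
--             for k in range(len(data)):
--                 if data[i] == data[j]:
--                     result.append(data[k])
--     return result
-- ===== SOURCE B (Python) =====
-- def inefficient_function(data):
--     # Count frequencies once; each equal-value index pair (i, j) contributes one
--     # full copy of data, so the result is data repeated m times, where
--     # m = sum over i of count(data[i]) = number of pairs with data[i] == data[j].
--     counts = {}
--     for x in data: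
--         counts[x] = counts.get(x, 0) + 1
--     m = 0
--     for x in data:
--         m += counts[x]
--     return data * m
-- ===== Notes on version B (the rewrite author's own statement) =====
-- stated objective: alternative
-- what changed: Replaces the triple nested index loop with a one-pass frequency dictionary: m = number of equal-value index pairs is computed in O(n) and the result is built as data * m instead of appending element by element (total cost is dominated by the Theta(n^3)-size output either way).
import Mathlib
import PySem

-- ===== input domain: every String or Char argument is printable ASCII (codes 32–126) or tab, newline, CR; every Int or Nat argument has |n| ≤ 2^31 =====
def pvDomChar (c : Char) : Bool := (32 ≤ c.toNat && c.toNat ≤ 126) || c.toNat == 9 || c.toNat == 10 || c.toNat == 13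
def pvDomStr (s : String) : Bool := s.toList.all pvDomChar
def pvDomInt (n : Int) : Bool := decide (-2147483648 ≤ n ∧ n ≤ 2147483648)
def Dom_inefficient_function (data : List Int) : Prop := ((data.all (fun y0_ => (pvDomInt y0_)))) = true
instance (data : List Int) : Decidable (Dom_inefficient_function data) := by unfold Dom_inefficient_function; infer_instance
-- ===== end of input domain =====

-- B replaces A's triple nested index loop by a one-pass frequency dictionary and a single
-- list repetition (objective: alternative). Equivalence of return values is proved below.

-- ===== PORT A =====
def inefficient_function (data : List Int) : List Int :=
  (PySem.List.pyRange 0 (PySem.List.len data) 1).foldl (fun result i =>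
    (PySem.List.pyRange 0 (PySem.List.len data) 1).foldl (fun result j =>
      (PySem.List.pyRange 0 (PySem.List.len data) 1).foldl (fun result k =>
        if PySem.List.pyGetD data i 0 = PySem.List.pyGetD data j 0 then
          result ++ [PySem.List.pyGetD data k 0]
        else result) result) result) []

-- ===== PORT B =====
def inefficient_function_alt (data : List Int) : List Int :=
  let counts := data.foldl (fun d x => d.insert x (d.getD x 0 + 1)) PySem.Dict.empty
  let m := data.foldl (fun acc x => acc + counts.getD x 0) 0
  PySem.List.pyRepeat data m

-- ===== PRECONDITION & SPEC =====
def Spec_inefficient_function (data : List Int) (out : List Int) : Prop := out = inefficient_function_alt data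
instance (data : List Int) (out : List Int) : Decidable (Spec_inefficient_function data out) := by unfold Spec_inefficient_function; infer_instance

-- ===== CLAIM (what is proved, stated in full; the proofs are below) =====
def Claim_equal_inefficient_function : Prop := ∀ (data : List Int), Dom_inefficient_function data → Spec_inefficient_function data (inefficient_function data)

-- ===== LEMMAS AND PROOFS =====

-- the innermost k-loop: if the test holds, append all of data; else no change
theorem pv_inner_k (data res : List Int) (c : Prop) [Decidable c] :
    (PySem.List.pyRange 0 (PySem.List.len data) 1).foldl
      (fun r k => if c then r ++ [PySem.List.pyGetD data k 0] else r) res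
      = if c then res ++ data else res := by
  by_cases h : c
  · simp only [h, if_true]
    rw [PySem.List.foldl_pyRange_zero_pyGetD data 0 (fun acc v => acc ++ [v]) res]
    exact PySem.List.foldl_append_singleton_eq_self data res
  · simp [h]

-- the j-loop around it, for an arbitrary pivot value a
theorem pv_inner_j (data res : List Int) (a : Int) :
    (PySem.List.pyRange 0 (PySem.List.len data) 1).foldl
      (fun r j => if a = PySem.List.pyGetD data j 0 then r ++ data else r) res
      = res ++ data.flatMap (fun x => if a = x then data else []) := by
  rw [PySem.List.foldl_pyRange_zero_pyGetD data 0 (fun r x => if a = x then r ++ data else r) res]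
  have h : ∀ (l : List Int) (acc : List Int),
      l.foldl (fun r x => if a = x then r ++ data else r) acc
        = acc ++ l.flatMap (fun x => if a = x then data else []) := by
    intro l
    induction l with
    | nil => intro acc; simp
    | cons y t ih =>
      intro acc
      by_cases h : a = y
      · subst h
        simp [ih, List.append_assoc]
      · simp [h, ih]
  exact h data res

-- flatMap of the equality test is the value's count many copies of data
theorem pv_flatMap_count (data : List Int) (a : Int) (l : List Int) :
    l.flatMap (fun x => if a = x then data else [])
      = (List.replicate (l.count a) data).flatten := by
  induction l with
  | nil => simp
  | cons y t ih =>
    by_cases h : a = y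
    · subst h
      rw [List.flatMap_cons, ih, List.count_cons_self, List.replicate_succ,
          List.flatten_cons, if_pos rfl]
    · have hne : (y == a) = false := by
        rw [beq_eq_false_iff_ne]; exact fun hya => h hya.symm
      rw [List.flatMap_cons, ih, List.count_cons, hne, if_neg h]
      simp

-- summing copy-blocks: flatMap of replicates is one big replicate of the total
theorem pv_flatMap_rep (D : List Int) (g : Int → Nat) (l : List Int) :
    l.flatMap (fun a => (List.replicate (g a) D).flatten)
      = (List.replicate ((l.map g).sum) D).flatten := by
  induction l with
  | nil => simp
  | cons y t ih =>
    rw [List.flatMap_cons, ih, List.map_cons, List.sum_cons, List.replicate_add,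
        List.flatten_append]

-- casting the Int count-sum back to Nat
theorem pv_sum_cast (D : List Int) (l : List Int) :
    ((l.map (fun x => ((D.count x : Nat) : Int))).sum).toNat = (l.map (fun x => D.count x)).sum := by
  have h : (l.map (fun x => ((D.count x : Nat) : Int))).sum
      = (((l.map (fun x => D.count x)).sum : Nat) : Int) := by
    induction l with
    | nil => simp
    | cons y t ih => simp [ih]
  rw [h, Int.toNat_natCast]

-- A's triple loop, reduced to a double flatMap over data
theorem pv_A_eq (data : List Int) : inefficient_function data
    = data.flatMap (fun a => data.flatMap (fun x => if a = x then data else [])) := by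
  unfold inefficient_function
  have hbody : ∀ (res : List Int) (i : Int),
      (PySem.List.pyRange 0 (PySem.List.len data) 1).foldl (fun result j =>
        (PySem.List.pyRange 0 (PySem.List.len data) 1).foldl (fun result k =>
          if PySem.List.pyGetD data i 0 = PySem.List.pyGetD data j 0 then
            result ++ [PySem.List.pyGetD data k 0]
          else result) result) res
      = res ++ data.flatMap (fun x => if PySem.List.pyGetD data i 0 = x then data else []) := by
    intro res i
    have hk : (fun (r : List Int) (j : Int) =>
        (PySem.List.pyRange 0 (PySem.List.len data) 1).foldl (fun result k =>
          if PySem.List.pyGetD data i 0 = PySem.List.pyGetD data j 0 then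
            result ++ [PySem.List.pyGetD data k 0]
          else result) r)
        = (fun r j => if PySem.List.pyGetD data i 0 = PySem.List.pyGetD data j 0 then
            r ++ data else r) :=
      funext fun r => funext fun j => pv_inner_k data r _
    rw [hk]
    exact pv_inner_j data res _
  have h1 : (PySem.List.pyRange 0 (PySem.List.len data) 1).foldl (fun result i =>
      (PySem.List.pyRange 0 (PySem.List.len data) 1).foldl (fun result j =>
        (PySem.List.pyRange 0 (PySem.List.len data) 1).foldl (fun result k =>
          if PySem.List.pyGetD data i 0 = PySem.List.pyGetD data j 0 then
            result ++ [PySem.List.pyGetD data k 0]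
          else result) result) result) []
      = (PySem.List.pyRange 0 (PySem.List.len data) 1).foldl (fun res i =>
          res ++ data.flatMap (fun x => if PySem.List.pyGetD data i 0 = x then data else [])) [] := by
    have hfun : (fun (result : List Int) (i : Int) =>
        (PySem.List.pyRange 0 (PySem.List.len data) 1).foldl (fun result j =>
          (PySem.List.pyRange 0 (PySem.List.len data) 1).foldl (fun result k =>
            if PySem.List.pyGetD data i 0 = PySem.List.pyGetD data j 0 then
              result ++ [PySem.List.pyGetD data k 0]
            else result) result) result)
        = (fun res i =>
            res ++ data.flatMap (fun x => if PySem.List.pyGetD data i 0 = x then data else [])) :=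
      funext fun res => funext fun i => hbody res i
    rw [hfun]
  rw [h1]
  have h2 : (PySem.List.pyRange 0 (PySem.List.len data) 1).foldl (fun res i =>
        res ++ data.flatMap (fun x => if PySem.List.pyGetD data i 0 = x then data else [])) []
      = data.foldl (fun res a =>
        res ++ data.flatMap (fun x => if a = x then data else [])) [] :=
    PySem.List.foldl_pyRange_zero_pyGetD data 0
      (fun res a => res ++ data.flatMap (fun x => if a = x then data else [])) []
  rw [h2, PySem.List.foldl_append_eq_flatMap
      (fun a => data.flatMap (fun x => if a = x then data else [])) data []]
  simp

-- ===== VERDICT (by name: the statement is the Claim_ definition above) =====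
theorem inefficient_function_spec : Claim_equal_inefficient_function := by
  intro data _
  unfold Spec_inefficient_function inefficient_function_alt
  rw [pv_A_eq data, PySem.Dict.foldl_insert_getD_add_one_eq_counter]
  simp only [PySem.Dict.getD_counter]
  rw [PySem.List.foldl_add data (fun x => ((data.count x : Nat) : Int)) 0]
  simp only [pv_flatMap_count, pv_flatMap_rep]
  unfold PySem.List.pyRepeat
  rw [Int.zero_add, pv_sum_cast data data]
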